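-- pv_equiv track=rewrite | github.com/Chippa-Rohith/daily-code-problems | daily problems pro solutions/problem2_murder.py | witnesses
-- ===== SOURCE A (Python) =====
-- def witnesses(heights):
--   count=1
--   for i in range(len(heights)-2,-1,-1):
--     for j in range(len(heights)-1,i-1,-1):
--       if heights[i]<=heights[j]:
--         break
--       if i==j-1:count+=1
--
--   return count
-- ===== SOURCE B (Python) =====
-- def witnesses(heights):
--     # single right-to-left pass tracking the running suffix maximum
--     count = 0
--     best = None
--     for h in reversed(heights):
--         if best is None or h > best:
--             count += 1
--             best = h
--     return count
-- ===== Notes on version B (the rewrite author's own statement) =====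
-- stated objective: faster
-- what changed: Replaced the nested index scan (for each position, rescan the whole suffix with a break) by one right-to-left pass that keeps the suffix maximum and counts elements strictly above it.
-- intended difference: On the empty list A returns 1 (its counter starts at 1 unconditionally) while B returns 0, the intended number of witnesses among zero people. — e.g. on witnesses([]): A returns 1, B returns 0
import Mathlib
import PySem

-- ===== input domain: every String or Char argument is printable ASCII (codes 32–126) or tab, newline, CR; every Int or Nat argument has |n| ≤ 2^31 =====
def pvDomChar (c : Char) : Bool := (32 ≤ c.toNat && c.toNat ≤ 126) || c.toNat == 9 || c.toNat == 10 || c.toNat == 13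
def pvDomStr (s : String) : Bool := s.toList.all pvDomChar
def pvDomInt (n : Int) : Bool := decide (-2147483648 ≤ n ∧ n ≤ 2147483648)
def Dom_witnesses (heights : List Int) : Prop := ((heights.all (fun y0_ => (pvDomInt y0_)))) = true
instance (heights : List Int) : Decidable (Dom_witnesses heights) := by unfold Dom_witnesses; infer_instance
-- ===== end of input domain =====

-- B replaces A's nested suffix rescans by one right-to-left pass over a running suffix
-- maximum (measured faster); on the empty list B returns the intended 0 where A returns 1.

-- ===== PORT A =====
-- inner loop 'for j in range(len(heights)-1, i-1, -1): if heights[i]<=heights[j]: break;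
-- if i==j-1: count+=1', recursion over the j-range with early return on the break.
-- (Both indices are always in range when the loop body runs, so heights[_] is ported as pyGetD.)
def witInner (hs : List Int) (i : Int) : List Int → Int → Int
  | [], c => c
  | j :: js, c =>
      if PySem.List.pyGetD hs i 0 ≤ PySem.List.pyGetD hs j 0 then c
      else witInner hs i js (if i = j - 1 then c + 1 else c)

def witnesses (heights : List Int) : Int :=
  (PySem.List.pyRange ((heights.length : Int) - 2) (-1) (-1)).foldl
    (fun c i =>
      witInner heights i (PySem.List.pyRange ((heights.length : Int) - 1) (i - 1) (-1)) c) 1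

-- ===== PORT B =====
-- loop body 'if best is None or h > best: count += 1; best = h' over reversed(heights),
-- carried as the state (best, count)
def altStep (st : Option Int × Int) (h : Int) : Option Int × Int :=
  match st with
  | (none, c) => (some h, c + 1)
  | (some b, c) => if h > b then (some h, c + 1) else (some b, c)

def witnesses_alt (heights : List Int) : Int :=
  (heights.reverse.foldl altStep (none, 0)).2

-- ===== PRECONDITION & SPEC =====
-- On the empty list A returns 1 (its counter starts at 1 unconditionally) while B returns 0,
-- the intended number of witnesses among zero people.
def D_witnesses (heights : List Int) : Prop := heights = []
instance (heights : List Int) : Decidable (D_witnesses heights) := by unfold D_witnesses; infer_instance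

def Spec_witnesses (heights : List Int) (out : Int) : Prop := ¬ D_witnesses heights → out = witnesses_alt heights
instance (heights : List Int) (out : Int) : Decidable (Spec_witnesses heights out) := by unfold Spec_witnesses; infer_instance

def pvDiffWitness_witnesses : List Int := ([])
def pvDiffWitnessOut_witnesses : Int × Int := (1, 0)

-- ===== CLAIM (what is proved, stated in full; the proofs are below) =====
def Claim_unchanged_witnesses : Prop := ∀ (heights : List Int), Dom_witnesses heights → Spec_witnesses heights (witnesses heights)
def Claim_changed_witnesses : Prop := Dom_witnesses (pvDiffWitness_witnesses) ∧ D_witnesses (pvDiffWitness_witnesses) ∧ witnesses (pvDiffWitness_witnesses) = pvDiffWitnessOut_witnesses.1 ∧ witnesses_alt (pvDiffWitness_witnesses) = pvDiffWitnessOut_witnesses.2 ∧ pvDiffWitnessOut_witnesses.1 ≠ pvDiffWitnessOut_witnesses.2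
def Claim_exact_witnesses : Prop := ∀ (heights : List Int), Dom_witnesses heights → D_witnesses heights → witnesses heights ≠ witnesses_alt heights

-- ===== LEMMAS AND PROOFS =====
-- 'beats hs i m' = position i is strictly taller than every position j with i < j ≤ m
def beats (hs : List Int) (i m : Int) : Bool :=
  (PySem.List.pyRange (i + 1) (m + 1) 1).all
    (fun j => PySem.List.pyGetD hs j 0 < PySem.List.pyGetD hs i 0)

theorem witInner_spec (k : Nat) (hs : List Int) (i : Int) : ∀ c : Int,
    witInner hs i (PySem.List.pyRange (i + 1 + (k : Int)) (i - 1) (-1)) c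
      = c + (if beats hs i (i + 1 + (k : Int)) then 1 else 0) := by
  induction k with
  | zero =>
    intro c
    simp only [Nat.cast_zero, add_zero]
    have e : PySem.List.pyRange (i + 1) (i - 1) (-1) = [i + 1, i] := by
      rw [PySem.List.pyRange_neg_one_cons (by omega),
          show i + 1 - 1 = i from by ring,
          PySem.List.pyRange_neg_one_cons (by omega),
          PySem.List.pyRange_neg_one_eq_nil le_rfl]
    have eb : beats hs i (i + 1)
        = decide (PySem.List.pyGetD hs (i + 1) 0 < PySem.List.pyGetD hs i 0) := by
      unfold beats
      rw [PySem.List.pyRange_one_succ_right (by omega),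
          PySem.List.pyRange_one_eq_nil le_rfl]
      simp
    rw [e, eb]
    simp only [witInner, show i + 1 - 1 = i from by ring, if_pos rfl, if_pos le_rfl]
    split_ifs with h1 h2 <;> simp_all <;> omega
  | succ k ih =>
    intro c
    simp only [Nat.cast_add, Nat.cast_one]
    have e : PySem.List.pyRange (i + 1 + ((k : Int) + 1)) (i - 1) (-1)
        = (i + 1 + ((k : Int) + 1)) :: PySem.List.pyRange (i + 1 + (k : Int)) (i - 1) (-1) := by
      rw [PySem.List.pyRange_neg_one_cons (by omega),
          show i + 1 + ((k : Int) + 1) - 1 = i + 1 + (k : Int) from by ring]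
    have eb : beats hs i (i + 1 + ((k : Int) + 1))
        = (beats hs i (i + 1 + (k : Int))
            && decide (PySem.List.pyGetD hs (i + 1 + ((k : Int) + 1)) 0 < PySem.List.pyGetD hs i 0)) := by
      unfold beats
      rw [show i + 1 + ((k : Int) + 1) + 1 = (i + 1 + ((k : Int) + 1)) + 1 from rfl,
          PySem.List.pyRange_one_succ_right (by omega),
          show i + 1 + ((k : Int) + 1) = (i + 1 + (k : Int)) + 1 from by ring]
      simp [List.all_append]
    rw [e]
    simp only [witInner]
    rw [if_neg (show ¬ (i = i + 1 + ((k : Int) + 1) - 1) from by omega), ih c, eb]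
    split_ifs with h1 h2 h3 <;> simp_all <;> omega

def cntA (hs : List Int) : Int :=
  ((List.range (hs.length - 1)).countP
    (fun (k : Nat) => beats hs ((k : Nat) : Int) ((hs.length : Int) - 1)) : Nat)

theorem witnesses_eq (hs : List Int) : witnesses hs = 1 + cntA hs := by
  unfold witnesses
  rw [PySem.List.foldl_congr_mem _ _
      (fun c i => c + (if beats hs i ((hs.length : Int) - 1) then 1 else 0)) 1 ?_]
  · rw [PySem.List.foldl_add, PySem.List.sum_map_ite_one_zero,
        PySem.List.pyRange_neg_one_eq_reverse, List.countP_reverse,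
        show (-1 : Int) + 1 = 0 from by ring,
        show ((hs.length : Int) - 2) + 1 = (hs.length : Int) - 1 from by ring,
        PySem.List.pyRange_one, List.countP_map,
        show (((hs.length : Int) - 1) - 0).toNat = hs.length - 1 from by omega]
    unfold cntA
    congr 1
    refine congrArg _ (List.countP_congr ?_)
    intro k _
    simp [Function.comp_apply]
  · intro acc i hi
    rw [PySem.List.mem_pyRange_neg_one] at hi
    have hk : (hs.length : Int) - 1 = i + 1 + (((hs.length : Int) - 2 - i).toNat : Int) := by omega
    rw [hk]
    exact witInner_spec _ hs i acc

theorem pyGetD_cast_succ (h : Int) (t : List Int) (n : Nat) :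
    PySem.List.pyGetD (h :: t) ((n : Int) + 1) 0 = PySem.List.pyGetD t (n : Int) 0 := by
  rw [show ((n : Int) + 1) = ((n + 1 : Nat) : Int) from by push_cast; ring,
      PySem.List.pyGetD_natCast, PySem.List.pyGetD_natCast, List.getD_cons_succ]

theorem beats_shift (h : Int) (t : List Int) (k m : Nat) :
    beats (h :: t) ((k : Int) + 1) ((m : Int) + 1) = beats t (k : Int) (m : Int) := by
  unfold beats
  rw [PySem.List.pyRange_one, PySem.List.pyRange_one, List.all_map, List.all_map,
      show ((m : Int) + 1 + 1 - ((k : Int) + 1 + 1)).toNat = ((m : Int) + 1 - ((k : Int) + 1)).toNat from by omega]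
  refine List.all_congr rfl (fun j => ?_)
  simp only [Function.comp_apply]
  have e1 : (k : Int) + 1 + 1 + (j : Int) = ((k + 1 + j : Nat) : Int) + 1 := by push_cast; ring
  have e2 : (k : Int) + 1 + (j : Int) = ((k + j : Nat) : Int) + 1 := by push_cast; ring
  have e3 : (k : Int) + 1 = ((k : Nat) : Int) + 1 := by push_cast; ring
  rw [e1, e3, pyGetD_cast_succ, pyGetD_cast_succ,
      show ((k + 1 + j : Nat) : Int) = ((k + j : Nat) : Int) + 1 from by push_cast; ring, e2]

theorem beats_zero (h : Int) (t : List Int) :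
    beats (h :: t) 0 ((t.length : Int)) = decide (∀ x ∈ t, x < h) := by
  unfold beats
  rw [show (0 : Int) + 1 = 1 from by ring, PySem.List.pyRange_one, List.all_map,
      show ((t.length : Int) + 1 - 1).toNat = t.length from by omega]
  rw [Bool.eq_iff_iff]
  simp only [List.all_eq_true, List.mem_range, Function.comp_apply, decide_eq_true_eq]
  have hidx : ∀ n : Nat,
      (PySem.List.pyGetD (h :: t) (1 + (n : Int)) 0 < PySem.List.pyGetD (h :: t) 0 0
        ↔ t.getD n 0 < h) := by
    intro n
    rw [show (1 : Int) + (n : Int) = ((n : Int)) + 1 from by ring, pyGetD_cast_succ,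
        PySem.List.pyGetD_natCast, show (0 : Int) = ((0 : Nat) : Int) from rfl,
        PySem.List.pyGetD_natCast, List.getD_cons_zero]
  have hgd : ∀ (n : Nat) (hn : n < t.length), t.getD n 0 = t[n] := by
    intro n hn
    simp [List.getD_eq_getElem?_getD, List.getElem?_eq_getElem hn]
  constructor
  · intro H x hx
    obtain ⟨n, hn, rfl⟩ := List.mem_iff_getElem.mp hx
    rw [← hgd n hn]
    exact (hidx n).mp (H n hn)
  · intro H n hn
    refine (hidx n).mpr ?_
    rw [hgd n hn]
    exact H _ (List.getElem_mem hn)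

theorem cntA_single (h : Int) : cntA [h] = 0 := by simp [cntA]

theorem cntA_cons (h : Int) (t : List Int) (ht : t ≠ []) :
    cntA (h :: t) = (if ∀ x ∈ t, x < h then 1 else 0) + cntA t := by
  obtain ⟨m, hm⟩ : ∃ m, t.length = m + 1 := by
    cases t with
    | nil => simp at ht
    | cons a l => exact ⟨l.length, by simp⟩
  have hz := beats_zero h t
  rw [hm] at hz
  unfold cntA
  simp only [List.length_cons]
  rw [hm]
  simp only [Nat.add_sub_cancel]
  rw [List.range_succ_eq_map, List.countP_cons, List.countP_map]
  have hc1 : ((m + 1 + 1 : Nat) : Int) - 1 = ((m : Int)) + 1 := by push_cast; ring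
  have hc2 : ((m + 1 : Nat) : Int) - 1 = ((m : Int)) := by push_cast; ring
  rw [hc1, hc2]
  have hpt : List.countP
        ((fun k : Nat => beats (h :: t) (k : Int) ((m : Int) + 1)) ∘ Nat.succ) (List.range m)
      = List.countP (fun k : Nat => beats t (k : Int) ((m : Int))) (List.range m) := by
    apply List.countP_congr
    intro k _
    simp only [Function.comp_apply]
    rw [show ((Nat.succ k : Nat) : Int) = ((k : Int)) + 1 from by push_cast; ring, beats_shift]
  have h0 : beats (h :: t) (((0 : Nat) : Int)) ((m : Int) + 1) = decide (∀ x ∈ t, x < h) := by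
    rw [show (((0 : Nat)) : Int) = (0 : Int) from rfl]
    rw [show ((m : Int)) + 1 = ((m + 1 : Nat) : Int) from by push_cast; ring]
    exact hz
  rw [hpt, h0]
  simp only [decide_eq_true_eq]
  split_ifs with hP
  · push_cast; ring
  · push_cast; ring

-- ===== B side =====
def bestOf : Option Int → List Int → Option Int
  | b, [] => b
  | none, x :: t => bestOf (some x) t
  | some m, x :: t => bestOf (some (if x > m then x else m)) t

def cntB : Option Int → List Int → Int
  | _, [] => 0
  | none, x :: t => 1 + cntB (some x) t
  | some m, x :: t => if x > m then 1 + cntB (some x) t else cntB (some m) t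

theorem foldl_altStep (l : List Int) : ∀ (b : Option Int) (c : Int),
    l.foldl altStep (b, c) = (bestOf b l, c + cntB b l) := by
  induction l with
  | nil => intro b c; simp [bestOf, cntB]
  | cons x t ih =>
    intro b c
    cases b with
    | none => simp [altStep, bestOf, cntB, ih]; ring
    | some m =>
      by_cases hx : x > m
      · simp [altStep, bestOf, cntB, hx, ih]; ring
      · simp [altStep, bestOf, cntB, hx, ih]

theorem bestOf_some (l : List Int) : ∀ m : Int, bestOf (some m) l = some (l.foldl max m) := by
  induction l with
  | nil => intro m; simp [bestOf]
  | cons x t ih =>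
    intro m
    rw [show bestOf (some m) (x :: t) = bestOf (some (if x > m then x else m)) t from rfl, ih,
        List.foldl_cons]
    congr 2
    split_ifs <;> omega

theorem foldl_max_lt (l : List Int) : ∀ m h : Int, l.foldl max m < h ↔ m < h ∧ ∀ x ∈ l, x < h := by
  induction l with
  | nil => intro m h; simp
  | cons x t ih =>
    intro m h
    rw [List.foldl_cons, ih]
    simp only [List.mem_cons, max_lt_iff]
    constructor
    · rintro ⟨⟨h1, h2⟩, h3⟩
      exact ⟨h1, fun z hz => hz.elim (fun e => e ▸ h2) (h3 z)⟩
    · rintro ⟨h1, h2⟩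
      exact ⟨⟨h1, h2 x (Or.inl rfl)⟩, fun z hz => h2 z (Or.inr hz)⟩

theorem alt_cons (h : Int) (t : List Int) :
    witnesses_alt (h :: t) = (if ∀ x ∈ t, x < h then 1 else 0) + witnesses_alt t := by
  unfold witnesses_alt
  rw [List.reverse_cons, List.foldl_append]
  cases t with
  | nil => simp [altStep]
  | cons a t' =>
    obtain ⟨y, ys, hrev⟩ : ∃ y ys, (a :: t').reverse = y :: ys := by
      rcases List.exists_cons_of_ne_nil (by simp : (a :: t').reverse ≠ []) with ⟨y, ys, e⟩
      exact ⟨y, ys, e⟩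
    rw [hrev, show (y :: ys).foldl altStep (none, 0) = ys.foldl altStep (some y, 0 + 1) from rfl,
        foldl_altStep ys (some y) (0 + 1), bestOf_some]
    have hiff : (∀ x ∈ a :: t', x < h) ↔ ys.foldl max y < h := by
      rw [foldl_max_lt]
      constructor
      · intro H
        refine ⟨H y (by rw [← List.mem_reverse, hrev]; simp), fun x hx => H x ?_⟩
        rw [← List.mem_reverse, hrev]; simp [hx]
      · rintro ⟨h1, h2⟩ x hx
        rw [← List.mem_reverse, hrev] at hx
        rcases List.mem_cons.mp hx with rfl | hx
        · exact h1
        · exact h2 x hx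
    simp only [List.foldl_cons, List.foldl_nil]
    by_cases hM : ys.foldl max y < h
    · rw [if_pos (hiff.mpr hM)]
      simp only [altStep, if_pos (show h > ys.foldl max y from hM)]
      ring
    · rw [if_neg (fun hp => hM (hiff.mp hp))]
      simp only [altStep, if_neg (show ¬ h > ys.foldl max y from hM)]
      ring

theorem main_eq (hs : List Int) (hne : hs ≠ []) : witnesses hs = witnesses_alt hs := by
  induction hs with
  | nil => simp at hne
  | cons h t ih =>
    cases t with
    | nil =>
      rw [witnesses_eq, cntA_single]
      simp [witnesses_alt, altStep]
    | cons a t' =>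
      rw [witnesses_eq, cntA_cons h _ (by simp), alt_cons,
          ← ih (by simp), witnesses_eq]
      ring

-- ===== VERDICT (by name: the statement is the Claim_ definition above) =====
theorem witnesses_spec : Claim_unchanged_witnesses := by
  intro hs _ hD
  exact main_eq hs (fun e => hD e)

theorem witnesses_changed : Claim_changed_witnesses := by
  unfold Claim_changed_witnesses; decide

theorem witnesses_tight : Claim_exact_witnesses := by
  intro hs _ hD
  have he : hs = [] := hD
  subst he
  decide
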